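-- pv_equiv track=rewrite | github.com/DavidHydroneWang/ProgramExercise | Python/Small_Test/09-25-2021/NearestNumber.py | exchange_head
-- ===== SOURCE A (Python) =====
-- def exchange_head(index, numbers=[]):
--     head = numbers[index-1]
--     for i in range(len(numbers)-1, 0, -1):
--         if head < numbers[i]:
--             numbers[index-1] = numbers[i]
--             numbers[i] = head
--             break
--     return numbers
-- ===== SOURCE B (Python) =====
-- def exchange_head(index, numbers=[]):
--     head = numbers[index - 1]
--     matches = [i for i in range(1, len(numbers)) if head < numbers[i]]
--     if matches:
--         pos = matches[-1]
--         numbers[index - 1] = numbers[pos]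
--         numbers[pos] = head
--     return numbers
-- ===== Notes on version B (the rewrite author's own statement) =====
-- stated objective: alternative
-- what changed: Replaces A's reverse scan with an in-loop break-and-swap by staged passes: a list comprehension collects all indices whose value exceeds the head, then the last collected index is used for one swap after the scan.
import Mathlib
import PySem

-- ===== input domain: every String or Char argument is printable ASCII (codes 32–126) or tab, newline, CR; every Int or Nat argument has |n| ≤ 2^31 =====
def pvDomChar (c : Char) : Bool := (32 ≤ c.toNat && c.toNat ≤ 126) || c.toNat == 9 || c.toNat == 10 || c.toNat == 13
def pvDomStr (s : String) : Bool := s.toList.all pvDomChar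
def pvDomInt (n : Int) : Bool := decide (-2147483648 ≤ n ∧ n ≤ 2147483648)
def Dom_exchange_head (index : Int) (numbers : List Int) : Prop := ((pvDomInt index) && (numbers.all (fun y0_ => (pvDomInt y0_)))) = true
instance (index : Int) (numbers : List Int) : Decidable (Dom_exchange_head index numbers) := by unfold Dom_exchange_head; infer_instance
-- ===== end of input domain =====

-- B replaces A's reverse loop with a break-and-swap inside it by staged passes: first a
-- comprehension collecting every index whose value exceeds the head, then one swap at the
-- last collected index (alternative decomposition; both Pythons mutate the list identically,
-- and the equivalence proved is about the return value).

-- ===== PORT A =====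
-- A's loop: for i in range(len(numbers)-1, 0, -1): if head < numbers[i]: swap; break
def exchange_head_loopA (head index : Int) (numbers : List Int) : List Int → List Int
  | [] => numbers
  | i :: rest =>
    if head < PySem.List.pyGetD numbers i 0 then
      PySem.List.pySetD (PySem.List.pySetD numbers (index - 1) (PySem.List.pyGetD numbers i 0)) i head
    else
      exchange_head_loopA head index numbers rest

def exchange_head (index : Int) (numbers : List Int) : List Int :=
  match PySem.List.pyGet? numbers (index - 1) with
  | none => numbers   -- Python raises IndexError here; excluded by Pre_
  | some head =>
    exchange_head_loopA head index numbers
      (PySem.List.pyRange ((numbers.length : Int) - 1) 0 (-1))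

-- ===== PORT B =====
def exchange_head_alt (index : Int) (numbers : List Int) : List Int :=
  match PySem.List.pyGet? numbers (index - 1) with
  | none => numbers   -- Python raises IndexError here; excluded by Pre_
  | some head =>
    let ms := (PySem.List.pyRange 1 (numbers.length : Int) 1).filter
        (fun i => decide (head < PySem.List.pyGetD numbers i 0))
    -- 'if matches: pos = matches[-1]; swap' — matches[-1] on a nonempty list is its last element
    match ms.getLast? with
    | none => numbers
    | some p =>
      PySem.List.pySetD (PySem.List.pySetD numbers (index - 1) (PySem.List.pyGetD numbers p 0)) p head

-- ===== PRECONDITION & SPEC =====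
def Pre_exchange_head (index : Int) (numbers : List Int) : Prop :=
  PySem.Raise.InRange numbers.length (index - 1)
instance (index : Int) (numbers : List Int) : Decidable (Pre_exchange_head index numbers) := by
  unfold Pre_exchange_head; infer_instance

def pvWitness_exchange_head : Int × List Int := (1, [2, 5, 3])

def Spec_exchange_head (index : Int) (numbers : List Int) (out : List Int) : Prop := out = exchange_head_alt index numbers
instance (index : Int) (numbers : List Int) (out : List Int) : Decidable (Spec_exchange_head index numbers out) := by unfold Spec_exchange_head; infer_instance

-- ===== CLAIM (what is proved, stated in full; the proofs are below) =====
def Claim_equal_exchange_head : Prop := ∀ (index : Int) (numbers : List Int), Dom_exchange_head index numbers → Pre_exchange_head index numbers → Spec_exchange_head index numbers (exchange_head index numbers)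

-- ===== LEMMAS AND PROOFS =====

-- first match of A's reverse scan = last element of B's filtered list
theorem exchange_head_rev_eq_filterLast (head index : Int) (numbers : List Int) (L : List Int) :
    exchange_head_loopA head index numbers L.reverse =
      match (L.filter (fun i => decide (head < PySem.List.pyGetD numbers i 0))).getLast? with
      | none => numbers
      | some p =>
        PySem.List.pySetD (PySem.List.pySetD numbers (index - 1) (PySem.List.pyGetD numbers p 0)) p head := by
  induction L using List.reverseRecOn with
  | nil => simp [exchange_head_loopA]
  | append_singleton L x ih =>
    rw [List.reverse_append, List.filter_append]
    simp only [List.reverse_singleton, List.singleton_append, exchange_head_loopA,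
      List.filter_cons, List.filter_nil]
    by_cases h : head < PySem.List.pyGetD numbers x 0
    · simp [h]
    · simp [h, ih]

theorem exchange_head_spec : Claim_equal_exchange_head := by
  intro index numbers _ _
  unfold Spec_exchange_head exchange_head exchange_head_alt
  cases h : PySem.List.pyGet? numbers (index - 1) with
  | none => rfl
  | some head =>
    simp only []
    rw [PySem.List.pyRange_neg_one_eq_reverse]
    have h01 : (0 : Int) + 1 = 1 := by norm_num
    have hlen : ((numbers.length : Int) - 1) + 1 = (numbers.length : Int) := by ring
    rw [h01, hlen, exchange_head_rev_eq_filterLast]
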